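-- pv_equiv track=rewrite | github.com/wufei-png/AskAny | askany/ingest/keyword_extract_wrapper.py | _filter_duplicate_and_substring_keywords
-- ===== SOURCE A (Python) =====
-- from typing import List, Optional, Tuple
--
-- def _filter_duplicate_and_substring_keywords(
--     keywords: List[str]
-- ) -> List[str]:
--     """过滤关键词列表：先去除小写重复，再去除子串
--
--     1. 首先过滤掉小写后一样的字符，只保留小写的
--     2. 然后过滤掉包含在长字符串中的子字符串
--
--     例如：['IPS', 'start failed', 'failed', 'ips', 'start']
--     - 第一步：小写去重 -> ['ips', 'start failed', 'failed', 'start']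
--     - 第二步：过滤子串 -> ['start failed', 'ips'] (过滤掉 'failed' 和 'start')
--
--     Args:
--         keywords: 待过滤的关键词列表
--
--     Returns:
--         过滤后的关键词列表
--     """
--     if not keywords:
--         return []
--
--     # 第一步：小写去重，保留小写版本
--     seen_lower = {}
--     lowercase_keywords = []
--     for kw in keywords:
--         kw_lower = kw.lower()
--         if kw_lower not in seen_lower:
--             seen_lower[kw_lower] = kw
--             lowercase_keywords.append(kw_lower)
--
--     # 第二步：过滤子串
--     # 按长度从长到短排序，这样长的字符串会先被处理
--     sorted_keywords = sorted(lowercase_keywords, key=len, reverse=True)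
--     filtered = []
--
--     for kw in sorted_keywords:
--         # 检查当前关键词是否是已保留关键词的子串
--         is_substring = False
--         for kept in filtered:
--             if kw in kept and kw != kept:
--                 is_substring = True
--                 break
--         if not is_substring:
--             filtered.append(kw)
--
--     return filtered
-- ===== SOURCE B (Python) =====
-- from typing import List
--
-- def _filter_duplicate_and_substring_keywords(keywords: List[str]) -> List[str]:
--     deduped = list(dict.fromkeys(kw.lower() for kw in keywords))
--     ranked = sorted(deduped, key=len, reverse=True)
--     result = []
--     longer = []   # all keywords strictly longer than the current length group
--     group = []    # keywords of the current length
--     cur = None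
--     for kw in ranked:
--         if cur != len(kw):
--             longer += group
--             group = []
--             cur = len(kw)
--         if not any(kw in other for other in longer):
--             result.append(kw)
--         group.append(kw)
--     return result
-- ===== Notes on version B (the rewrite author's own statement) =====
-- stated objective: alternative
-- what changed: Replaces A's manual seen-dict dedup loop by a dict.fromkeys dedup, and replaces A's incremental filter (each keyword tested against all previously KEPT keywords) by a length-bucketed single pass over the sorted list that tests each keyword only against the STRICTLY LONGER keywords (correct because a keyword is dropped iff some longer keyword contains it, by transitivity/maximality of the substring relation).
import Mathlib
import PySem

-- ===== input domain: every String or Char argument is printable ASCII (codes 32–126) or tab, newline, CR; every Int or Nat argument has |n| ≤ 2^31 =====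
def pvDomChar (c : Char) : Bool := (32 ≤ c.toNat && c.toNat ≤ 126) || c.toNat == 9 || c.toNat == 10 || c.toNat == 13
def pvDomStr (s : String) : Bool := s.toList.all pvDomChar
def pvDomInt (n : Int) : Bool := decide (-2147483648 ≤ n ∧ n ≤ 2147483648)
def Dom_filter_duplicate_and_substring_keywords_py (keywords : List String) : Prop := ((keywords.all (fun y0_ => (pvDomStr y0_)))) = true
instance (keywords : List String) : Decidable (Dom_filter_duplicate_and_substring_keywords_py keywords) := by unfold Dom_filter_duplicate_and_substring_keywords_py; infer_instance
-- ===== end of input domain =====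

-- B replaces A's seen-dict dedup loop and its kept-accumulator substring filter by a
-- dict.fromkeys dedup and a length-bucketed single pass that tests each keyword only
-- against the strictly longer keywords (objective: alternative decomposition).


-- ===== PORT A =====
-- literal transliteration of A: guard, seen-dict + lowercase list loop, sort by length
-- descending, then the incremental filter keeping strings not substrings of a kept one
def filter_duplicate_and_substring_keywords_py (keywords : List String) : List String :=
  if keywords = [] then []
  else
    let st := keywords.foldl
      (fun (st : PySem.Dict String String × List String) kw =>
        let kw_lower := PySem.Str.lower kw
        if st.1.contains kw_lower then st
        else (st.1.insert kw_lower kw, st.2 ++ [kw_lower]))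
      (PySem.Dict.empty, [])
    let lowercase_keywords := st.2
    let sorted_keywords := PySem.List.sorted lowercase_keywords PySem.Str.len true
    sorted_keywords.foldl
      (fun filtered kw =>
        if filtered.any (fun kept => PySem.Str.isIn kw kept && kw != kept) then filtered
        else filtered ++ [kw])
      []

-- ===== PORT B =====
-- B's loop body: flush the current length group into `longer` when the length changes,
-- then keep kw iff no strictly longer keyword contains it (state: result, longer, group, cur)
def pvStepB (st : List String × List String × List String × Option Int) (kw : String) :
    List String × List String × List String × Option Int :=
  let result := st.1
  let longer := st.2.1
  let group := st.2.2.1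
  let cur := st.2.2.2
  let fl := if cur ≠ some (PySem.Str.len kw)
    then (longer ++ group, ([] : List String), some (PySem.Str.len kw))
    else (longer, group, cur)
  let longer := fl.1
  let group := fl.2.1
  let cur := fl.2.2
  let result := if longer.any (fun other => PySem.Str.isIn kw other) then result
    else result ++ [kw]
  (result, longer, group ++ [kw], cur)

-- transliteration of Source B: dict.fromkeys dedup of the lowercased keywords, stable
-- length-descending sort, one bucketed pass collecting `result`
def filter_duplicate_and_substring_keywords_py_alt (keywords : List String) : List String :=
  let deduped := PySem.List.dedup (keywords.map PySem.Str.lower)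
  let ranked := PySem.List.sorted deduped PySem.Str.len true
  (ranked.foldl pvStepB ([], [], [], none)).1

-- ===== PRECONDITION & SPEC =====
def Spec_filter_duplicate_and_substring_keywords_py (keywords : List String) (out : List String) : Prop := out = filter_duplicate_and_substring_keywords_py_alt keywords
instance (keywords : List String) (out : List String) : Decidable (Spec_filter_duplicate_and_substring_keywords_py keywords out) := by unfold Spec_filter_duplicate_and_substring_keywords_py; infer_instance

-- ===== CLAIM (what is proved, stated in full; the proofs are below) =====
def Claim_equal_filter_duplicate_and_substring_keywords_py : Prop := ∀ (keywords : List String), Dom_filter_duplicate_and_substring_keywords_py keywords → Spec_filter_duplicate_and_substring_keywords_py keywords (filter_duplicate_and_substring_keywords_py keywords)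

-- ===== LEMMAS AND PROOFS =====

-- A keyword w is "bad" (to be dropped) iff some OTHER deduped keyword contains it
def pvBad (D : List String) (w : String) : Prop :=
  ∃ x ∈ D, x ≠ w ∧ w.toList <:+: x.toList

-- the common filter predicate both loops are proved to compute
def pvKeep (D : List String) (w : String) : Bool :=
  ! D.any (fun x => x != w && PySem.Str.isIn w x)

lemma pvKeep_eq_true_iff (D : List String) (kw : String) :
    pvKeep D kw = true ↔ ¬ pvBad D kw := by
  simp [pvKeep, pvBad]
  constructor
  · intro h x hx hne; exact (PySem.Chars.isIn_eq_false_iff _ _).mp (h x hx hne)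
  · intro h x hx hne; exact (PySem.Chars.isIn_eq_false_iff _ _).mpr (h x hx hne)

lemma pvKeep_eq_false_iff (D : List String) (kw : String) :
    pvKeep D kw = false ↔ pvBad D kw := by
  cases h : pvKeep D kw with
  | false => simpa using not_not.mp (fun hnb => by
      have := (pvKeep_eq_true_iff D kw).mpr hnb; rw [h] at this; exact Bool.false_ne_true this)
  | true => simpa using (pvKeep_eq_true_iff D kw).mp h

-- a bad keyword even has a STRICTLY LONGER superstring among its fellows
lemma pvBad_lt (D : List String) (kw : String) (h : pvBad D kw) :
    ∃ x ∈ D, kw.toList.length < x.toList.length ∧ kw.toList <:+: x.toList := by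
  obtain ⟨x, hx, hne, hinf⟩ := h
  exact ⟨x, hx, lt_of_le_of_ne hinf.length_le
    (fun he => hne (String.toList_inj.mp (hinf.eq_of_length he)).symm), hinf⟩

-- Phase 1: A's seen-dict loop produces exactly dedup (map lower keywords)
lemma phase1 (kws : List String) :
    ∀ (d : PySem.Dict String String) (acc : List String), d.keys = acc →
    (kws.foldl
      (fun (st : PySem.Dict String String × List String) kw =>
        let kw_lower := PySem.Str.lower kw
        if st.1.contains kw_lower then st
        else (st.1.insert kw_lower kw, st.2 ++ [kw_lower]))
      (d, acc)).2 = PySem.Set.update acc (kws.map PySem.Str.lower) := by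
  induction kws with
  | nil => intro d acc _; rfl
  | cons kw kws ih =>
    intro d acc hk
    simp only [List.foldl_cons, List.map_cons]
    by_cases h : d.contains (PySem.Str.lower kw) = true
    · have hmem : PySem.Str.lower kw ∈ acc := hk ▸ (PySem.Dict.contains_iff_mem_keys d _).mp h
      have hadd : PySem.Set.add acc (PySem.Str.lower kw) = acc := by
        simp [PySem.Set.add, hmem]
      rw [show PySem.Set.update acc (PySem.Str.lower kw :: kws.map PySem.Str.lower)
            = PySem.Set.update (PySem.Set.add acc (PySem.Str.lower kw)) (kws.map PySem.Str.lower)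
          from rfl, hadd]
      simpa [h] using ih d acc hk
    · have hf : d.contains (PySem.Str.lower kw) = false := by
        cases hcc : d.contains (PySem.Str.lower kw) with
        | false => rfl
        | true => exact absurd hcc h
      have hnm : PySem.Str.lower kw ∉ acc := fun hm =>
        h ((PySem.Dict.contains_iff_mem_keys d _).mpr (hk ▸ hm))
      have hadd : PySem.Set.add acc (PySem.Str.lower kw) = acc ++ [PySem.Str.lower kw] := by
        simp [PySem.Set.add, hnm]
      have hkeys : (d.insert (PySem.Str.lower kw) kw).keys = acc ++ [PySem.Str.lower kw] := by
        have h2 := PySem.Dict.keys_foldl_insert (ν := String) [PySem.Str.lower kw]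
          (fun _ _ => kw) d
        simp only [List.foldl_cons, List.foldl_nil] at h2
        rw [h2, show PySem.Set.update d.keys [PySem.Str.lower kw]
              = PySem.Set.add d.keys (PySem.Str.lower kw) from rfl, hk, hadd]
      rw [show PySem.Set.update acc (PySem.Str.lower kw :: kws.map PySem.Str.lower)
            = PySem.Set.update (PySem.Set.add acc (PySem.Str.lower kw)) (kws.map PySem.Str.lower)
          from rfl, hadd]
      simpa [hf] using ih (d.insert (PySem.Str.lower kw) kw) (acc ++ [PySem.Str.lower kw]) hkeys

-- strings of bounded length have a maximal superstring among their fellows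
lemma exists_maximal (D : List String) :
    ∀ (n : Nat) (x : String), x ∈ D → (∀ y ∈ D, y.toList.length ≤ x.toList.length + n) →
    ∃ k ∈ D, ¬ pvBad D k ∧ x.toList <:+: k.toList := by
  intro n
  induction n with
  | zero =>
    intro x hx hb
    refine ⟨x, hx, ?_, List.infix_rfl⟩
    rintro ⟨y, hy, hne, hinf⟩
    have h1 := hinf.length_le
    have h2 := hb y hy
    have hlen : x.toList.length = y.toList.length := by omega
    exact hne (String.toList_inj.mp (hinf.eq_of_length hlen)).symm
  | succ n ih =>
    intro x hx hb
    by_cases hbad : pvBad D x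
    · obtain ⟨y, hy, hlt, hinf⟩ := pvBad_lt D x hbad
      have hb' : ∀ z ∈ D, z.toList.length ≤ y.toList.length + n := by
        intro z hz; have := hb z hz; omega
      obtain ⟨k, hk, hmax, hyk⟩ := ih y hy hb'
      exact ⟨k, hk, hmax, hinf.trans hyk⟩
    · exact ⟨x, hx, hbad, List.infix_rfl⟩

lemma exists_maximal' (D : List String) (x : String) (hx : x ∈ D) :
    ∃ k ∈ D, ¬ pvBad D k ∧ x.toList <:+: k.toList := by
  refine exists_maximal D ((D.map (fun s => s.toList.length)).sum) x hx ?_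
  intro y hy
  have : y.toList.length ≤ (D.map (fun s => s.toList.length)).sum :=
    List.single_le_sum (fun a _ => Nat.zero_le a) _ (List.mem_map_of_mem hy)
  omega

-- an element of L longer than the head of the suffix lies in the processed prefix
lemma mem_prefix_of_longer (L P S' : List String) (kw x : String)
    (hpw : L.Pairwise (fun a b => PySem.Str.len b ≤ PySem.Str.len a))
    (h : L = P ++ kw :: S') (hxL : x ∈ L)
    (hlen : kw.toList.length < x.toList.length) : x ∈ P := by
  rw [h] at hxL
  rcases List.mem_append.mp hxL with hp | hs
  · exact hp
  · exfalso
    rcases List.mem_cons.mp hs with rfl | hs'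
    · omega
    · have hpw' : (P ++ kw :: S').Pairwise (fun a b => PySem.Str.len b ≤ PySem.Str.len a) :=
        h ▸ hpw
      have hle : PySem.Str.len x ≤ PySem.Str.len kw :=
        (List.pairwise_cons.mp (List.pairwise_append.mp hpw').2.1).1 x hs'
      rw [PySem.Str.len_eq, PySem.Str.len_eq] at hle
      omega

-- Phase 2 for A: the incremental filter computes filter pvKeep
lemma phaseA (D L : List String)
    (hpw : L.Pairwise (fun a b => PySem.Str.len b ≤ PySem.Str.len a))
    (hD : ∀ x, x ∈ L ↔ x ∈ D) :
    ∀ (S P : List String), L = P ++ S →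
    S.foldl
      (fun filtered kw =>
        if filtered.any (fun kept => PySem.Str.isIn kw kept && kw != kept) then filtered
        else filtered ++ [kw])
      (P.filter (pvKeep D))
    = L.filter (pvKeep D) := by
  intro S
  induction S with
  | nil => intro P h; simp only [List.append_nil] at h; subst h; rfl
  | cons kw S' ih =>
    intro P h
    simp only [List.foldl_cons]
    have hsub : L = (P ++ [kw]) ++ S' := by rw [h]; simp
    by_cases hc : ((P.filter (pvKeep D)).any
        (fun kept => PySem.Str.isIn kw kept && kw != kept)) = true
    · -- kw is a substring of an already-kept keyword: it is bad, both sides drop it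
      obtain ⟨kept, hkeptmem, hprop⟩ := List.any_eq_true.mp hc
      rw [Bool.and_eq_true] at hprop
      obtain ⟨hin, hbne⟩ := hprop
      have hkeptP : kept ∈ P := List.mem_of_mem_filter hkeptmem
      have hkeptD : kept ∈ D := (hD kept).mp (h ▸ List.mem_append_left _ hkeptP)
      have hbad : pvBad D kw :=
        ⟨kept, hkeptD, (bne_iff_ne.mp hbne).symm, (PySem.Str.isIn_iff_infix kw kept).mp hin⟩
      have hk0 : pvKeep D kw = false := (pvKeep_eq_false_iff D kw).mpr hbad
      rw [if_pos hc]
      have hfe : (P ++ [kw]).filter (pvKeep D) = P.filter (pvKeep D) := by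
        simp [List.filter_append, hk0]
      rw [← hfe]
      exact ih (P ++ [kw]) hsub
    · -- nothing kept contains kw: kw is maximal-safe, both sides keep it
      have hnotbad : ¬ pvBad D kw := by
        intro hbad
        obtain ⟨x, hxD, hxlt, hinf⟩ := pvBad_lt D kw hbad
        obtain ⟨k, hkD, hkmax, hxk⟩ := exists_maximal' D x hxD
        have hkwk : kw.toList <:+: k.toList := hinf.trans hxk
        have hklen : x.toList.length ≤ k.toList.length := hxk.length_le
        have hkP : k ∈ P := mem_prefix_of_longer L P S' kw k hpw h ((hD k).mpr hkD) (by omega)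
        have hkkeep : pvKeep D k = true := (pvKeep_eq_true_iff D k).mpr hkmax
        have hkne : kw ≠ k := fun he => by rw [he] at hxlt; omega
        have : ((P.filter (pvKeep D)).any
            (fun kept => PySem.Str.isIn kw kept && kw != kept)) = true := by
          refine List.any_eq_true.mpr ⟨k, List.mem_filter.mpr ⟨hkP, hkkeep⟩, ?_⟩
          rw [Bool.and_eq_true]
          exact ⟨(PySem.Str.isIn_iff_infix kw k).mpr hkwk, bne_iff_ne.mpr hkne⟩
        exact hc this
      have hk1 : pvKeep D kw = true := (pvKeep_eq_true_iff D kw).mpr hnotbad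
      rw [if_neg hc]
      have hfe : (P ++ [kw]).filter (pvKeep D) = P.filter (pvKeep D) ++ [kw] := by
        simp [List.filter_append, hk1]
      rw [← hfe]
      exact ih (P ++ [kw]) hsub

-- on a descending list whose lengths are all ≥ c, the >c part is a prefix of the =c part
lemma filter_split (c : Int) :
    ∀ (P : List String), P.Pairwise (fun a b => PySem.Str.len b ≤ PySem.Str.len a) →
    (∀ o ∈ P, c ≤ PySem.Str.len o) →
    P.filter (fun o => decide (c < PySem.Str.len o)) ++ P.filter (fun o => PySem.Str.len o == c)
      = P := by
  intro P
  induction P with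
  | nil => intro _ _; rfl
  | cons o P' ih =>
    intro hpw hge
    have hpw' := (List.pairwise_cons.mp hpw).2
    have hgeo := hge o (List.mem_cons_self ..)
    by_cases hlt : c < PySem.Str.len o
    · have hne : PySem.Str.len o ≠ c := by omega
      have e1 : List.filter (fun o => decide (c < PySem.Str.len o)) (o :: P')
          = o :: List.filter (fun o => decide (c < PySem.Str.len o)) P' :=
        List.filter_cons_of_pos (by simpa using hlt)
      have e2 : List.filter (fun o => PySem.Str.len o == c) (o :: P')
          = List.filter (fun o => PySem.Str.len o == c) P' :=
        List.filter_cons_of_neg (by simpa using hne)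
      rw [e1, e2, List.cons_append, ih hpw' (fun x hx => hge x (List.mem_cons_of_mem _ hx))]
    · have heq : PySem.Str.len o = c := by omega
      have h1 : P'.filter (fun o => decide (c < PySem.Str.len o)) = [] := by
        rw [List.filter_eq_nil_iff]
        intro x hx
        have := (List.pairwise_cons.mp hpw).1 x hx
        simp only [decide_eq_true_eq]
        omega
      have h2 : P'.filter (fun o => PySem.Str.len o == c) = P' := by
        rw [List.filter_eq_self]
        intro x hx
        have h3 := (List.pairwise_cons.mp hpw).1 x hx
        have h4 := hge x (List.mem_cons_of_mem _ hx)
        simp only [beq_iff_eq]; omega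
      have e1 : List.filter (fun o => decide (c < PySem.Str.len o)) (o :: P')
          = List.filter (fun o => decide (c < PySem.Str.len o)) P' :=
        List.filter_cons_of_neg (by simpa using hlt)
      have e2 : List.filter (fun o => PySem.Str.len o == c) (o :: P')
          = o :: List.filter (fun o => PySem.Str.len o == c) P' :=
        List.filter_cons_of_pos (by simpa using heq)
      rw [e1, e2, h1, h2, List.nil_append]

-- the scan over the strictly longer keywords decides pvBad
lemma any_longer_iff (D L P S' : List String) (kw : String)
    (hpw : L.Pairwise (fun a b => PySem.Str.len b ≤ PySem.Str.len a))
    (hD : ∀ x, x ∈ L ↔ x ∈ D) (h : L = P ++ kw :: S')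
    (longer : List String)
    (hmem : ∀ x, x ∈ longer ↔ x ∈ P ∧ PySem.Str.len kw < PySem.Str.len x) :
    (longer.any (fun other => PySem.Str.isIn kw other)) = true ↔ pvBad D kw := by
  constructor
  · intro hc
    obtain ⟨o, ho, hin⟩ := List.any_eq_true.mp hc
    obtain ⟨hoP, holt⟩ := (hmem o).mp ho
    have hne : o ≠ kw := fun he => by rw [he] at holt; omega
    exact ⟨o, (hD o).mp (h ▸ List.mem_append_left _ hoP), hne,
      (PySem.Str.isIn_iff_infix kw o).mp hin⟩
  · intro hbad
    obtain ⟨x, hxD, hxlt, hinf⟩ := pvBad_lt D kw hbad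
    have hxP : x ∈ P := mem_prefix_of_longer L P S' kw x hpw h ((hD x).mpr hxD) hxlt
    have hxlen : PySem.Str.len kw < PySem.Str.len x := by
      rw [PySem.Str.len_eq, PySem.Str.len_eq]; omega
    exact List.any_eq_true.mpr ⟨x, (hmem x).mpr ⟨hxP, hxlen⟩,
      (PySem.Str.isIn_iff_infix kw x).mpr hinf⟩

-- Phase 2 for B: the bucketed loop invariant
lemma phaseB_loop (D L : List String)
    (hpw : L.Pairwise (fun a b => PySem.Str.len b ≤ PySem.Str.len a))
    (hD : ∀ x, x ∈ L ↔ x ∈ D) :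
    ∀ (S P : List String) (c : Int), L = P ++ S →
    (∀ o ∈ P, c ≤ PySem.Str.len o) → (∃ g ∈ P, PySem.Str.len g = c) →
    (S.foldl pvStepB
      (P.filter (pvKeep D),
       P.filter (fun o => decide (c < PySem.Str.len o)),
       P.filter (fun o => PySem.Str.len o == c),
       some c)).1
    = L.filter (pvKeep D) := by
  intro S
  induction S with
  | nil =>
    intro P c h _ _
    simp only [List.append_nil] at h; subst h; rfl
  | cons kw S' ih =>
    intro P c h hge ⟨g, hgP, hgc⟩
    have hsub : L = (P ++ [kw]) ++ S' := by rw [h]; simp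
    have hpw' : (P ++ kw :: S').Pairwise (fun a b => PySem.Str.len b ≤ PySem.Str.len a) :=
      h ▸ hpw
    have hPk : ∀ o ∈ P, PySem.Str.len kw ≤ PySem.Str.len o := fun o ho =>
      (List.pairwise_append.mp hpw').2.2 o ho kw (List.mem_cons_self ..)
    have hkc : PySem.Str.len kw ≤ c := hgc ▸ hPk g hgP
    simp only [List.foldl_cons]
    by_cases hcur : c = PySem.Str.len kw
    · -- same length group: no flush
      subst hcur
      have hany := any_longer_iff D L P S' kw hpw hD h
        (P.filter (fun o => decide (PySem.Str.len kw < PySem.Str.len o)))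
        (fun x => by simp [List.mem_filter])
      have hLong : (P ++ [kw]).filter (fun o => decide (PySem.Str.len kw < PySem.Str.len o))
          = P.filter (fun o => decide (PySem.Str.len kw < PySem.Str.len o)) := by
        rw [List.filter_append, List.filter_cons_of_neg (by simp), List.filter_nil,
          List.append_nil]
      have hGrp : (P ++ [kw]).filter (fun o => PySem.Str.len o == PySem.Str.len kw)
          = P.filter (fun o => PySem.Str.len o == PySem.Str.len kw) ++ [kw] := by
        rw [List.filter_append, List.filter_cons_of_pos (by simp), List.filter_nil]
      have hstep : pvStepB
          (P.filter (pvKeep D),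
           P.filter (fun o => decide (PySem.Str.len kw < PySem.Str.len o)),
           P.filter (fun o => PySem.Str.len o == PySem.Str.len kw),
           some (PySem.Str.len kw)) kw
          = ((P ++ [kw]).filter (pvKeep D),
             (P ++ [kw]).filter (fun o => decide (PySem.Str.len kw < PySem.Str.len o)),
             (P ++ [kw]).filter (fun o => PySem.Str.len o == PySem.Str.len kw),
             some (PySem.Str.len kw)) := by
        have hcond : ¬ (some (PySem.Str.len kw) ≠ some (PySem.Str.len kw)) := by simp
        simp only [pvStepB, if_neg hcond]
        by_cases hb : pvBad D kw
        · have hkf : pvKeep D kw = false := (pvKeep_eq_false_iff D kw).mpr hb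
          have hOut : (P ++ [kw]).filter (pvKeep D) = P.filter (pvKeep D) := by
            rw [List.filter_append, List.filter_cons_of_neg (by simp [hkf]),
              List.filter_nil, List.append_nil]
          rw [if_pos (hany.mpr hb), hOut, hLong, hGrp]
        · have hkt : pvKeep D kw = true := (pvKeep_eq_true_iff D kw).mpr hb
          have hOut : (P ++ [kw]).filter (pvKeep D) = P.filter (pvKeep D) ++ [kw] := by
            rw [List.filter_append, List.filter_cons_of_pos (by simp [hkt]), List.filter_nil]
          rw [if_neg (fun hx => hb (hany.mp hx)), hOut, hLong, hGrp]
      rw [hstep]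
      exact ih (P ++ [kw]) (PySem.Str.len kw) hsub
        (by intro o ho; rcases List.mem_append.mp ho with h1 | h1
            · exact hPk o h1
            · simp at h1; subst h1; omega)
        ⟨kw, by simp, rfl⟩
    · -- shorter group starts: flush, scan the whole prefix (= all longer keywords)
      have hklt : PySem.Str.len kw < c := lt_of_le_of_ne hkc (fun he => hcur he.symm)
      have hPall : P.filter (fun o => decide (c < PySem.Str.len o))
          ++ P.filter (fun o => PySem.Str.len o == c) = P :=
        filter_split c P ((List.pairwise_append.mp hpw').1) hge
      have hany := any_longer_iff D L P S' kw hpw hD h P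
        (fun x => by
          constructor
          · intro hx; exact ⟨hx, lt_of_lt_of_le hklt (hge x hx)⟩
          · intro hx; exact hx.1)
      have h1 : P.filter (fun o => decide (PySem.Str.len kw < PySem.Str.len o)) = P := by
        rw [List.filter_eq_self]
        intro x hx
        have := hge x hx
        simp only [decide_eq_true_eq]; omega
      have h2 : P.filter (fun o => PySem.Str.len o == PySem.Str.len kw) = [] := by
        rw [List.filter_eq_nil_iff]
        intro x hx
        have := hge x hx
        simp only [beq_iff_eq]; omega
      have hLong : (P ++ [kw]).filter (fun o => decide (PySem.Str.len kw < PySem.Str.len o))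
          = P := by
        rw [List.filter_append, h1, List.filter_cons_of_neg (by simp), List.filter_nil,
          List.append_nil]
      have hGrp : (P ++ [kw]).filter (fun o => PySem.Str.len o == PySem.Str.len kw)
          = [kw] := by
        rw [List.filter_append, h2, List.filter_cons_of_pos (by simp), List.filter_nil,
          List.nil_append]
      have hstep : pvStepB
          (P.filter (pvKeep D),
           P.filter (fun o => decide (c < PySem.Str.len o)),
           P.filter (fun o => PySem.Str.len o == c),
           some c) kw
          = ((P ++ [kw]).filter (pvKeep D),
             (P ++ [kw]).filter (fun o => decide (PySem.Str.len kw < PySem.Str.len o)),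
             (P ++ [kw]).filter (fun o => PySem.Str.len o == PySem.Str.len kw),
             some (PySem.Str.len kw)) := by
        have hcond : (some c ≠ some (PySem.Str.len kw)) := by simpa using hcur
        simp only [pvStepB, if_pos hcond, hPall, List.nil_append]
        by_cases hb : pvBad D kw
        · have hkf : pvKeep D kw = false := (pvKeep_eq_false_iff D kw).mpr hb
          have hOut : (P ++ [kw]).filter (pvKeep D) = P.filter (pvKeep D) := by
            rw [List.filter_append, List.filter_cons_of_neg (by simp [hkf]),
              List.filter_nil, List.append_nil]
          rw [if_pos (hany.mpr hb), hOut, hLong, hGrp]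
        · have hkt : pvKeep D kw = true := (pvKeep_eq_true_iff D kw).mpr hb
          have hOut : (P ++ [kw]).filter (pvKeep D) = P.filter (pvKeep D) ++ [kw] := by
            rw [List.filter_append, List.filter_cons_of_pos (by simp [hkt]), List.filter_nil]
          rw [if_neg (fun hx => hb (hany.mp hx)), hOut, hLong, hGrp]
      rw [hstep]
      exact ih (P ++ [kw]) (PySem.Str.len kw) hsub
        (by intro o ho; rcases List.mem_append.mp ho with h1 | h1
            · have := hge o h1; have := hPk o h1; omega
            · simp at h1; subst h1; omega)
        ⟨kw, by simp, rfl⟩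

-- Phase 2 for B, from the initial (cur = None) state
lemma phaseB (D L : List String)
    (hpw : L.Pairwise (fun a b => PySem.Str.len b ≤ PySem.Str.len a))
    (hD : ∀ x, x ∈ L ↔ x ∈ D) :
    (L.foldl pvStepB ([], [], [], none)).1 = L.filter (pvKeep D) := by
  cases hL : L with
  | nil => rfl
  | cons kw S' =>
    have hnb : ¬ pvBad D kw := by
      intro hbad
      obtain ⟨x, hxD, hxlt, _⟩ := pvBad_lt D kw hbad
      exact absurd (mem_prefix_of_longer L [] S' kw x hpw hL ((hD x).mpr hxD) hxlt)
        (List.not_mem_nil)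
    have hk1 : pvKeep D kw = true := (pvKeep_eq_true_iff D kw).mpr hnb
    have hstep : pvStepB ([], [], [], none) kw
        = ([kw].filter (pvKeep D),
           [kw].filter (fun o => decide (PySem.Str.len kw < PySem.Str.len o)),
           [kw].filter (fun o => PySem.Str.len o == PySem.Str.len kw),
           some (PySem.Str.len kw)) := by
      simp [pvStepB, hk1]
    rw [List.foldl_cons, hstep]
    have hthis := phaseB_loop D L hpw hD S' [kw] (PySem.Str.len kw) (by rw [hL]; rfl)
      (by intro o ho; simp at ho; subst ho; omega) ⟨kw, by simp, rfl⟩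
    rw [hL] at hthis
    exact hthis

-- ===== VERDICT (by name: the statement is the Claim_ definition above) =====
theorem filter_duplicate_and_substring_keywords_py_spec : Claim_equal_filter_duplicate_and_substring_keywords_py := by
  intro keywords _
  unfold Spec_filter_duplicate_and_substring_keywords_py
  unfold filter_duplicate_and_substring_keywords_py filter_duplicate_and_substring_keywords_py_alt
  by_cases hk : keywords = []
  · subst hk; rfl
  · simp only [if_neg hk]
    have h1 := phase1 keywords PySem.Dict.empty [] rfl
    rw [h1]
    have hupd : PySem.Set.update ([] : List String) (keywords.map PySem.Str.lower)
        = PySem.List.dedup (keywords.map PySem.Str.lower) := by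
      rw [PySem.List.dedup_eq_ofList, PySem.Set.update_nil_left]
    rw [hupd]
    set D := PySem.List.dedup (keywords.map PySem.Str.lower) with hDdef
    set L := PySem.List.sorted D PySem.Str.len true with hLdef
    have hpw : L.Pairwise (fun a b => PySem.Str.len b ≤ PySem.Str.len a) :=
      PySem.List.sorted_pairwise_rev D PySem.Str.len
    have hD : ∀ x, x ∈ L ↔ x ∈ D := fun x => PySem.List.mem_sorted D PySem.Str.len true x
    have hA := phaseA D L hpw hD L [] rfl
    have hB := phaseB D L hpw hD
    simp only [List.filter_nil] at hA
    rw [hB]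
    simpa using hA
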